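-- pv_equiv track=rewrite | github.com/odoo/o-spreadsheet | make_helpers_async.py | skip_template_literal
-- ===== SOURCE A (Python) =====
-- def skip_line_comment(src: str, pos: int) -> int:
--     while pos < len(src) and src[pos] != "\n":
--         pos += 1
--     return pos
--
-- def skip_block_comment(src: str, pos: int) -> int:
--     while pos < len(src) - 1:
--         if src[pos] == "*" and src[pos + 1] == "/":
--             return pos + 2
--         pos += 1
--     return len(src)
--
-- def skip_string(src: str, pos: int, quote: str) -> int:
--     while pos < len(src):
--         ch = src[pos]
--         if ch == "\\":
--             pos += 2
--             continue
--         if ch == quote: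
--             return pos + 1
--         pos += 1
--     return len(src)
--
-- def skip_template_literal(src: str, pos: int) -> int:
--     while pos < len(src):
--         ch = src[pos]
--         if ch == "\\":
--             pos += 2
--             continue
--         if ch == "`":
--             return pos + 1
--         if ch == "$" and pos + 1 < len(src) and src[pos + 1] == "{":
--             pos = skip_balanced_braces(src, pos + 2)
--             continue
--         pos += 1
--     return len(src)
--
-- def skip_balanced_braces(src: str, pos: int) -> int:
--     depth = 1
--     while pos < len(src) and depth > 0:
--         ch = src[pos]
--         if ch == "/" and pos + 1 < len(src):
--             if src[pos + 1] == "/":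
--                 pos = skip_line_comment(src, pos + 2)
--                 continue
--             if src[pos + 1] == "*":
--                 pos = skip_block_comment(src, pos + 2)
--                 continue
--         if ch in ('"', "'"):
--             pos = skip_string(src, pos + 1, ch)
--             continue
--         if ch == "`":
--             pos = skip_template_literal(src, pos + 1)
--             continue
--         if ch == "{":
--             depth += 1
--         elif ch == "}":
--             depth -= 1
--         pos += 1
--     return pos
-- ===== SOURCE B (Python) =====
-- def skip_template_literal(src: str, pos: int) -> int:
--     # Flat scanner: one loop over src driven by an explicit stack of scan states
--     # (template / ${...}-braces / string / line comment / block comment).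
--     TMPL, BRACES, STR, LINE, BLOCK = 0, 1, 2, 3, 4
--     n = len(src)
--     stack = [(TMPL, None)]
--     while pos < n:
--         kind, arg = stack[-1]
--         ch = src[pos]
--         if kind == TMPL:
--             if ch == "\\":
--                 pos += 2
--             elif ch == "`":
--                 stack.pop()
--                 if not stack:
--                     return pos + 1
--                 pos += 1
--             elif ch == "$" and pos + 1 < n and src[pos + 1] == "{":
--                 stack.append((BRACES, 1))
--                 pos += 2
--             else:
--                 pos += 1
--         elif kind == BRACES:
--             if ch == "/" and pos + 1 < n and src[pos + 1] == "/":
--                 stack.append((LINE, None))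
--                 pos += 2
--             elif ch == "/" and pos + 1 < n and src[pos + 1] == "*":
--                 stack.append((BLOCK, None))
--                 pos += 2
--             elif ch in ('"', "'"):
--                 stack.append((STR, ch))
--                 pos += 1
--             elif ch == "`":
--                 stack.append((TMPL, None))
--                 pos += 1
--             elif ch == "{":
--                 stack[-1] = (BRACES, arg + 1)
--                 pos += 1
--             elif ch == "}":
--                 if arg == 1:
--                     stack.pop()
--                 else:
--                     stack[-1] = (BRACES, arg - 1)
--                 pos += 1
--             else:
--                 pos += 1
--         elif kind == STR:
--             if ch == "\\":
--                 pos += 2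
--             elif ch == arg:
--                 stack.pop()
--                 pos += 1
--             else:
--                 pos += 1
--         elif kind == LINE:
--             if ch == "\n":
--                 stack.pop()
--             pos += 1
--         else:  # BLOCK
--             if pos == n - 1:
--                 return n  # unterminated block comment swallows the rest
--             if ch == "*" and src[pos + 1] == "/":
--                 stack.pop()
--                 pos += 2
--             else:
--                 pos += 1
--     return n
-- ===== Notes on version B (the rewrite author's own statement) =====
-- stated objective: alternative
-- what changed: Replaces A's five mutually recursive skip functions with a single flat loop over the source driven by an explicit stack of scan states (template / braces-depth / string / line comment / block comment), so no recursion is needed.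
import Mathlib
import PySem

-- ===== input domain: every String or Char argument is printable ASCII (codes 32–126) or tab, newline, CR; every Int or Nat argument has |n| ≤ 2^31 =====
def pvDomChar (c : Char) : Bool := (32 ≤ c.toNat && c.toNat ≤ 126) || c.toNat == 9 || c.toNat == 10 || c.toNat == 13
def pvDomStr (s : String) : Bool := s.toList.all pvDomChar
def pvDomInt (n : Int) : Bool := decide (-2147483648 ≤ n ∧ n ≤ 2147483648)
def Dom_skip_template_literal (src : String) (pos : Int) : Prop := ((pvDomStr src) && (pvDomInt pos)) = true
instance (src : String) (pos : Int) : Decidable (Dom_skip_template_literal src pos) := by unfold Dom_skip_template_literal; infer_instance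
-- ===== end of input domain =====

-- B replaces A's mutual recursion by one flat loop over an explicit stack of scan
-- states (alternative decomposition, same cost). Fuel in both ports is only a
-- totality device; with the generous fuel both ports use it is never exhausted on
-- inputs satisfying Pre_.

-- ===== PORT A =====
-- character read src[i] (Python negative-index semantics); the default is never
-- reached on inputs satisfying Pre_ (where Python A does not raise IndexError)
def pvChar (cs : List Char) (i : Int) : Char := (PySem.List.pyGet? cs i).getD '\x00'

-- skip_line_comment, fuel-threaded (returns (pos, remaining fuel))
def lineF (cs : List Char) : Nat → Int → Int × Nat
  | 0, pos => (pos, 0)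
  | f+1, pos =>
    if pos < (cs.length : Int) ∧ pvChar cs pos ≠ '\n' then lineF cs f (pos+1)
    else (pos, f+1)

-- skip_block_comment, fuel-threaded
def blockF (cs : List Char) : Nat → Int → Int × Nat
  | 0, pos => (pos, 0)
  | f+1, pos =>
    if pos < (cs.length : Int) - 1 then
      if pvChar cs pos = '*' ∧ pvChar cs (pos + 1) = '/' then (pos + 2, f+1)
      else blockF cs f (pos + 1)
    else ((cs.length : Int), f+1)

-- skip_string, fuel-threaded
def stringF (cs : List Char) (q : Char) : Nat → Int → Int × Nat
  | 0, pos => (pos, 0)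
  | f+1, pos =>
    if pos < (cs.length : Int) then
      if pvChar cs pos = '\\' then stringF cs q f (pos + 2)
      else if pvChar cs pos = q then (pos + 1, f+1)
      else stringF cs q f (pos + 1)
    else ((cs.length : Int), f+1)

theorem lineF_fuel (cs : List Char) (f : Nat) (pos : Int) : (lineF cs f pos).2 ≤ f := by
  induction f generalizing pos with
  | zero => simp [lineF]
  | succ f ih =>
    simp only [lineF]
    split
    · exact Nat.le_succ_of_le (ih _)
    · exact Nat.le_refl _

theorem blockF_fuel (cs : List Char) (f : Nat) (pos : Int) : (blockF cs f pos).2 ≤ f := by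
  induction f generalizing pos with
  | zero => simp [blockF]
  | succ f ih =>
    simp only [blockF]
    split
    · split
      · exact Nat.le_refl _
      · exact Nat.le_succ_of_le (ih _)
    · exact Nat.le_refl _

theorem stringF_fuel (cs : List Char) (q : Char) (f : Nat) (pos : Int) :
    (stringF cs q f pos).2 ≤ f := by
  induction f generalizing pos with
  | zero => simp [stringF]
  | succ f ih =>
    simp only [stringF]
    split
    · split
      · exact Nat.le_succ_of_le (ih _)
      · split
        · exact Nat.le_refl _
        · exact Nat.le_succ_of_le (ih _)
    · exact Nat.le_refl _

-- skip_template_literal / skip_balanced_braces, mutual, fuel-threaded; the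
-- subtype bound on the remaining fuel is only needed for termination
mutual
def templateF (cs : List Char) (f : Nat) (pos : Int) : {p : Int × Nat // p.2 ≤ f} :=
  match f with
  | 0 => ⟨(pos, 0), Nat.le_refl 0⟩
  | f+1 =>
    if pos < (cs.length : Int) then
      if pvChar cs pos = '\\' then
        match templateF cs f (pos + 2) with
        | ⟨p, h⟩ => ⟨p, Nat.le_succ_of_le h⟩
      else if pvChar cs pos = '`' then ⟨(pos + 1, f+1), Nat.le_refl _⟩
      else if pvChar cs pos = '$' ∧ pos + 1 < (cs.length : Int) ∧ pvChar cs (pos + 1) = '{' then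
        match templateF_cont cs f (bracesF cs f 1 (pos + 2)) with
        | ⟨p, h⟩ => ⟨p, Nat.le_succ_of_le h⟩
      else
        match templateF cs f (pos + 1) with
        | ⟨p, h⟩ => ⟨p, Nat.le_succ_of_le h⟩
    else ⟨((cs.length : Int), f+1), Nat.le_refl _⟩
termination_by 3 * f + 1
decreasing_by
  all_goals first
    | omega
    | (simp only [] at *; omega)
    | (have hb := lineF_fuel cs f (pos + 2); rw [h] at hb; omega)
    | (have hb := blockF_fuel cs f (pos + 2); rw [h] at hb; omega)
    | (have hb := stringF_fuel cs (pvChar cs pos) f (pos + 1); rw [h] at hb; omega)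

-- resume the template loop after skip_balanced_braces returned
def templateF_cont (cs : List Char) (f0 : Nat) (r : {p : Int × Nat // p.2 ≤ f0}) :
    {p : Int × Nat // p.2 ≤ f0} :=
  match r with
  | ⟨(pos, f'), h⟩ =>
    match templateF cs f' pos with
    | ⟨p, h2⟩ => ⟨p, Nat.le_trans h2 h⟩
termination_by 3 * f0 + 2
decreasing_by
  all_goals first
    | omega
    | (simp only [] at *; omega)
    | (have hb := lineF_fuel cs f (pos + 2); rw [h] at hb; omega)
    | (have hb := blockF_fuel cs f (pos + 2); rw [h] at hb; omega)
    | (have hb := stringF_fuel cs (pvChar cs pos) f (pos + 1); rw [h] at hb; omega)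

def bracesF (cs : List Char) (f : Nat) (depth : Int) (pos : Int) : {p : Int × Nat // p.2 ≤ f} :=
  match f with
  | 0 => ⟨(pos, 0), Nat.le_refl 0⟩
  | f+1 =>
    if pos < (cs.length : Int) ∧ 0 < depth then
      if pvChar cs pos = '/' ∧ pos + 1 < (cs.length : Int) ∧ pvChar cs (pos + 1) = '/' then
        match h : lineF cs f (pos + 2) with
        | (r, f') =>
          match bracesF cs f' depth r with
          | ⟨p, h2⟩ =>
            ⟨p, Nat.le_succ_of_le (Nat.le_trans h2 (by
                  have := lineF_fuel cs f (pos + 2); rw [h] at this; exact this))⟩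
      else if pvChar cs pos = '/' ∧ pos + 1 < (cs.length : Int) ∧ pvChar cs (pos + 1) = '*' then
        match h : blockF cs f (pos + 2) with
        | (r, f') =>
          match bracesF cs f' depth r with
          | ⟨p, h2⟩ =>
            ⟨p, Nat.le_succ_of_le (Nat.le_trans h2 (by
                  have := blockF_fuel cs f (pos + 2); rw [h] at this; exact this))⟩
      else if pvChar cs pos = '"' ∨ pvChar cs pos = '\'' then
        match h : stringF cs (pvChar cs pos) f (pos + 1) with
        | (r, f') =>
          match bracesF cs f' depth r with
          | ⟨p, h2⟩ =>
            ⟨p, Nat.le_succ_of_le (Nat.le_trans h2 (by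
                  have := stringF_fuel cs (pvChar cs pos) f (pos + 1); rw [h] at this; exact this))⟩
      else if pvChar cs pos = '`' then
        match templateF cs f (pos + 1) with
        | ⟨(r, f'), h⟩ =>
          match bracesF cs f' depth r with
          | ⟨p, h2⟩ => ⟨p, Nat.le_succ_of_le (Nat.le_trans h2 h)⟩
      else if pvChar cs pos = '{' then
        match bracesF cs f (depth + 1) (pos + 1) with
        | ⟨p, h⟩ => ⟨p, Nat.le_succ_of_le h⟩
      else if pvChar cs pos = '}' then
        match bracesF cs f (depth - 1) (pos + 1) with
        | ⟨p, h⟩ => ⟨p, Nat.le_succ_of_le h⟩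
      else
        match bracesF cs f depth (pos + 1) with
        | ⟨p, h⟩ => ⟨p, Nat.le_succ_of_le h⟩
    else ⟨(pos, f+1), Nat.le_refl _⟩
termination_by 3 * f + 1
decreasing_by
  all_goals first
    | omega
    | (simp only [] at *; omega)
    | (have hb := lineF_fuel cs f (pos + 2); rw [h] at hb; omega)
    | (have hb := blockF_fuel cs f (pos + 2); rw [h] at hb; omega)
    | (have hb := stringF_fuel cs (pvChar cs pos) f (pos + 1); rw [h] at hb; omega)
end

def skip_template_literal (src : String) (pos : Int) : Int :=
  (templateF src.toList (2 * src.toList.length + 16) pos).val.1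

-- ===== PORT B =====
inductive ScanState where
  | tmpl
  | braces (depth : Int)
  | str (q : Char)
  | line
  | block
deriving DecidableEq, Repr

-- the flat scanning loop of Source B: one step per examined character, driven by the
-- state stack; fuel is a totality device (pops that A performs by returning from
-- a helper consume no fuel, so both ports exhaust fuel identically)
def bloop (cs : List Char) (f : Nat) (pos : Int) (stk : List ScanState) : Int :=
  match f, stk with
  | 0, _ => pos
  | f+1, stk =>
    if pos < (cs.length : Int) then
      match stk with
      | [] => pos
      | .tmpl :: rest =>
        if pvChar cs pos = '\\' then bloop cs f (pos + 2) (.tmpl :: rest)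
        else if pvChar cs pos = '`' then
          if rest.isEmpty then pos + 1
          else bloop cs (f+1) (pos + 1) rest
        else if pvChar cs pos = '$' ∧ pos + 1 < (cs.length : Int) ∧ pvChar cs (pos + 1) = '{' then
          bloop cs f (pos + 2) (.braces 1 :: .tmpl :: rest)
        else bloop cs f (pos + 1) (.tmpl :: rest)
      | .braces d :: rest =>
        if pvChar cs pos = '/' ∧ pos + 1 < (cs.length : Int) ∧ pvChar cs (pos + 1) = '/' then
          bloop cs f (pos + 2) (.line :: .braces d :: rest)
        else if pvChar cs pos = '/' ∧ pos + 1 < (cs.length : Int) ∧ pvChar cs (pos + 1) = '*' then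
          bloop cs f (pos + 2) (.block :: .braces d :: rest)
        else if pvChar cs pos = '"' ∨ pvChar cs pos = '\'' then
          bloop cs f (pos + 1) (.str (pvChar cs pos) :: .braces d :: rest)
        else if pvChar cs pos = '`' then
          bloop cs f (pos + 1) (.tmpl :: .braces d :: rest)
        else if pvChar cs pos = '{' then
          bloop cs f (pos + 1) (.braces (d + 1) :: rest)
        else if pvChar cs pos = '}' then
          if d = 1 then bloop cs f (pos + 1) rest
          else bloop cs f (pos + 1) (.braces (d - 1) :: rest)
        else bloop cs f (pos + 1) (.braces d :: rest)
      | .str q :: rest =>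
        if pvChar cs pos = '\\' then bloop cs f (pos + 2) (.str q :: rest)
        else if pvChar cs pos = q then bloop cs (f+1) (pos + 1) rest
        else bloop cs f (pos + 1) (.str q :: rest)
      | .line :: rest =>
        if pvChar cs pos = '\n' then bloop cs f (pos + 1) rest
        else bloop cs f (pos + 1) (.line :: rest)
      | .block :: rest =>
        if pos = (cs.length : Int) - 1 then (cs.length : Int)
        else if pvChar cs pos = '*' ∧ pvChar cs (pos + 1) = '/' then
          bloop cs (f+1) (pos + 2) rest
        else bloop cs f (pos + 1) (.block :: rest)
    else (cs.length : Int)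
termination_by (f, stk.length)
decreasing_by all_goals first
  | (apply Prod.Lex.left; omega)
  | (apply Prod.Lex.right; simp; omega)
  | (apply Prod.Lex.right; simp)

def skip_template_literal_alt (src : String) (pos : Int) : Int :=
  bloop src.toList (2 * src.toList.length + 16) pos [.tmpl]

-- ===== PRECONDITION & SPEC =====
-- Pre_ excludes exactly the inputs where the Python A raises IndexError:
-- pos < -len(src), where the first read src[pos] is out of range.
def Pre_skip_template_literal (src : String) (pos : Int) : Prop :=
  -(PySem.Str.len src) ≤ pos
instance (src : String) (pos : Int) : Decidable (Pre_skip_template_literal src pos) := by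
  unfold Pre_skip_template_literal; infer_instance

def pvWitness_skip_template_literal : String × Int := ("`a${1+2}b`", 0)

def Spec_skip_template_literal (src : String) (pos : Int) (out : Int) : Prop :=
  out = skip_template_literal_alt src pos
instance (src : String) (pos : Int) (out : Int) : Decidable (Spec_skip_template_literal src pos out) := by
  unfold Spec_skip_template_literal; infer_instance

-- ===== CLAIM (what is proved, stated in full; the proofs are below) =====
def Claim_equal_skip_template_literal : Prop :=
  ∀ (src : String) (pos : Int), Dom_skip_template_literal src pos →
    Pre_skip_template_literal src pos →
    Spec_skip_template_literal src pos (skip_template_literal src pos)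

-- ===== LEMMAS AND PROOFS =====

-- A-side view of a stack frame: run the corresponding A helper to completion
def runFrame (cs : List Char) (s : ScanState) (f : Nat) (pos : Int) : Int × Nat :=
  match s with
  | .tmpl => (templateF cs f pos).val
  | .braces d => (bracesF cs f d pos).val
  | .str q => stringF cs q f pos
  | .line => lineF cs f pos
  | .block => blockF cs f pos

-- A's computation for a whole stack: run each frame in turn on the previous result
def unwind (cs : List Char) : Nat → Int → List ScanState → Int
  | _, pos, [] => pos
  | f, pos, s :: rest => unwind cs (runFrame cs s f pos).2 (runFrame cs s f pos).1 rest

-- the stacks B actually builds: template at the bottom, each auxiliary frame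
-- sits on a braces frame, each braces frame (depth ≥ 1) on a template frame
def wfStk : List ScanState → Prop
  | [] => False
  | [s] => s = ScanState.tmpl
  | s :: t :: rest =>
    (match s, t with
     | .tmpl, .braces _ => True
     | .braces d, .tmpl => 1 ≤ d
     | .str _, .braces _ => True
     | .line, .braces _ => True
     | .block, .braces _ => True
     | _, _ => False) ∧ wfStk (t :: rest)

theorem runFrame_zero (cs : List Char) (s : ScanState) (pos : Int) :
    runFrame cs s 0 pos = (pos, 0) := by
  cases s <;> simp [runFrame, templateF, bracesF, stringF, lineF, blockF]

theorem unwind_zero (cs : List Char) (pos : Int) (stk : List ScanState) :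
    unwind cs 0 pos stk = pos := by
  induction stk with
  | nil => rfl
  | cons s rest ih => simp [unwind, runFrame_zero, ih]

theorem templateF_exit (cs : List Char) (f : Nat) (pos : Int)
    (h : ¬ pos < (cs.length : Int)) :
    (templateF cs (f+1) pos).val = ((cs.length : Int), f+1) := by
  rw [templateF]; simp [h]

theorem templateF_backslash (cs : List Char) (f : Nat) (pos : Int)
    (h : pos < (cs.length : Int)) (hc : pvChar cs pos = '\\') :
    (templateF cs (f+1) pos).val = (templateF cs f (pos + 2)).val := by
  rw [templateF]; simp [h, hc]
  all_goals (rcases templateF cs f (pos + 2) with ⟨p, hp⟩; rfl)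

theorem templateF_tick (cs : List Char) (f : Nat) (pos : Int)
    (h : pos < (cs.length : Int)) (h1 : ¬ pvChar cs pos = '\\')
    (hc : pvChar cs pos = '`') :
    (templateF cs (f+1) pos).val = (pos + 1, f+1) := by
  rw [templateF]; simp [h, h1, hc]

theorem templateF_cont_val (cs : List Char) (f0 : Nat) (r : {p : Int × Nat // p.2 ≤ f0}) :
    (templateF_cont cs f0 r).val = (templateF cs r.val.2 r.val.1).val := by
  rcases r with ⟨⟨a, b⟩, h⟩
  rw [templateF_cont]
  all_goals (rcases templateF cs b a with ⟨p, hp⟩; rfl)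

theorem templateF_dollar (cs : List Char) (f : Nat) (pos : Int)
    (h : pos < (cs.length : Int)) (h1 : ¬ pvChar cs pos = '\\')
    (h2 : ¬ pvChar cs pos = '`')
    (hc : pvChar cs pos = '$' ∧ pos + 1 < (cs.length : Int) ∧ pvChar cs (pos + 1) = '{') :
    (templateF cs (f+1) pos).val =
      (templateF cs (bracesF cs f 1 (pos + 2)).val.2 (bracesF cs f 1 (pos + 2)).val.1).val := by
  rw [templateF]; simp [h, h1, h2, hc, templateF_cont_val]

theorem templateF_other (cs : List Char) (f : Nat) (pos : Int)
    (h : pos < (cs.length : Int)) (h1 : ¬ pvChar cs pos = '\\')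
    (h2 : ¬ pvChar cs pos = '`')
    (h3 : ¬ (pvChar cs pos = '$' ∧ pos + 1 < (cs.length : Int) ∧ pvChar cs (pos + 1) = '{')) :
    (templateF cs (f+1) pos).val = (templateF cs f (pos + 1)).val := by
  rw [templateF]; simp [h, h1, h2, h3]
  all_goals (rcases templateF cs f (pos + 1) with ⟨p, hp⟩; rfl)

theorem bracesF_exit (cs : List Char) (f : Nat) (d pos : Int)
    (h : ¬ (pos < (cs.length : Int) ∧ 0 < d)) :
    (bracesF cs (f+1) d pos).val = (pos, f+1) := by
  rw [bracesF]; simp [h]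

theorem bracesF_line (cs : List Char) (f : Nat) (d pos : Int)
    (h : pos < (cs.length : Int) ∧ 0 < d)
    (hc : pvChar cs pos = '/' ∧ pos + 1 < (cs.length : Int) ∧ pvChar cs (pos + 1) = '/') :
    (bracesF cs (f+1) d pos).val =
      (bracesF cs (lineF cs f (pos + 2)).2 d (lineF cs f (pos + 2)).1).val := by
  rw [bracesF]; simp [h, hc]
  all_goals (rcases lineF cs f (pos + 2) with ⟨r, f'⟩; simp)
  all_goals (rcases bracesF cs f' d r with ⟨p, hp⟩; rfl)

theorem bracesF_block (cs : List Char) (f : Nat) (d pos : Int)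
    (h : pos < (cs.length : Int) ∧ 0 < d)
    (h1 : ¬ (pvChar cs pos = '/' ∧ pos + 1 < (cs.length : Int) ∧ pvChar cs (pos + 1) = '/'))
    (hc : pvChar cs pos = '/' ∧ pos + 1 < (cs.length : Int) ∧ pvChar cs (pos + 1) = '*') :
    (bracesF cs (f+1) d pos).val =
      (bracesF cs (blockF cs f (pos + 2)).2 d (blockF cs f (pos + 2)).1).val := by
  rw [bracesF]; simp [h, h1, hc]
  all_goals (rcases blockF cs f (pos + 2) with ⟨r, f'⟩; simp)
  all_goals (rcases bracesF cs f' d r with ⟨p, hp⟩; rfl)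

theorem bracesF_str (cs : List Char) (f : Nat) (d pos : Int)
    (h : pos < (cs.length : Int) ∧ 0 < d)
    (h1 : ¬ (pvChar cs pos = '/' ∧ pos + 1 < (cs.length : Int) ∧ pvChar cs (pos + 1) = '/'))
    (h2 : ¬ (pvChar cs pos = '/' ∧ pos + 1 < (cs.length : Int) ∧ pvChar cs (pos + 1) = '*'))
    (hc : pvChar cs pos = '"' ∨ pvChar cs pos = '\'') :
    (bracesF cs (f+1) d pos).val =
      (bracesF cs (stringF cs (pvChar cs pos) f (pos + 1)).2 d
        (stringF cs (pvChar cs pos) f (pos + 1)).1).val := by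
  rw [bracesF]; simp [h, h1, h2, hc]
  all_goals (rcases stringF cs (pvChar cs pos) f (pos + 1) with ⟨r, f'⟩; simp)
  all_goals (rcases bracesF cs f' d r with ⟨p, hp⟩; rfl)

theorem bracesF_tick (cs : List Char) (f : Nat) (d pos : Int)
    (h : pos < (cs.length : Int) ∧ 0 < d)
    (h1 : ¬ (pvChar cs pos = '/' ∧ pos + 1 < (cs.length : Int) ∧ pvChar cs (pos + 1) = '/'))
    (h2 : ¬ (pvChar cs pos = '/' ∧ pos + 1 < (cs.length : Int) ∧ pvChar cs (pos + 1) = '*'))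
    (h3 : ¬ (pvChar cs pos = '"' ∨ pvChar cs pos = '\''))
    (hc : pvChar cs pos = '`') :
    (bracesF cs (f+1) d pos).val =
      (bracesF cs (templateF cs f (pos + 1)).val.2 d (templateF cs f (pos + 1)).val.1).val := by
  rw [bracesF]; simp [h, h1, h2, h3, hc]
  all_goals (rcases templateF cs f (pos + 1) with ⟨⟨r, f'⟩, hp⟩; simp)
  all_goals (rcases bracesF cs f' d r with ⟨p, hp2⟩; rfl)

theorem bracesF_open (cs : List Char) (f : Nat) (d pos : Int)
    (h : pos < (cs.length : Int) ∧ 0 < d)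
    (h1 : ¬ (pvChar cs pos = '/' ∧ pos + 1 < (cs.length : Int) ∧ pvChar cs (pos + 1) = '/'))
    (h2 : ¬ (pvChar cs pos = '/' ∧ pos + 1 < (cs.length : Int) ∧ pvChar cs (pos + 1) = '*'))
    (h3 : ¬ (pvChar cs pos = '"' ∨ pvChar cs pos = '\''))
    (h4 : ¬ pvChar cs pos = '`') (hc : pvChar cs pos = '{') :
    (bracesF cs (f+1) d pos).val = (bracesF cs f (d + 1) (pos + 1)).val := by
  rw [bracesF]; simp [h, h1, h2, h3, h4, hc]
  all_goals (rcases bracesF cs f (d + 1) (pos + 1) with ⟨p, hp⟩; rfl)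

theorem bracesF_close (cs : List Char) (f : Nat) (d pos : Int)
    (h : pos < (cs.length : Int) ∧ 0 < d)
    (h1 : ¬ (pvChar cs pos = '/' ∧ pos + 1 < (cs.length : Int) ∧ pvChar cs (pos + 1) = '/'))
    (h2 : ¬ (pvChar cs pos = '/' ∧ pos + 1 < (cs.length : Int) ∧ pvChar cs (pos + 1) = '*'))
    (h3 : ¬ (pvChar cs pos = '"' ∨ pvChar cs pos = '\''))
    (h4 : ¬ pvChar cs pos = '`') (h5 : ¬ pvChar cs pos = '{') (hc : pvChar cs pos = '}') :
    (bracesF cs (f+1) d pos).val = (bracesF cs f (d - 1) (pos + 1)).val := by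
  rw [bracesF]; simp [h, h1, h2, h3, h4, h5, hc]
  all_goals (rcases bracesF cs f (d - 1) (pos + 1) with ⟨p, hp⟩; rfl)

theorem bracesF_other (cs : List Char) (f : Nat) (d pos : Int)
    (h : pos < (cs.length : Int) ∧ 0 < d)
    (h1 : ¬ (pvChar cs pos = '/' ∧ pos + 1 < (cs.length : Int) ∧ pvChar cs (pos + 1) = '/'))
    (h2 : ¬ (pvChar cs pos = '/' ∧ pos + 1 < (cs.length : Int) ∧ pvChar cs (pos + 1) = '*'))
    (h3 : ¬ (pvChar cs pos = '"' ∨ pvChar cs pos = '\''))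
    (h4 : ¬ pvChar cs pos = '`') (h5 : ¬ pvChar cs pos = '{') (h6 : ¬ pvChar cs pos = '}') :
    (bracesF cs (f+1) d pos).val = (bracesF cs f d (pos + 1)).val := by
  rw [bracesF]; simp [h, h1, h2, h3, h4, h5, h6]
  all_goals (rcases bracesF cs f d (pos + 1) with ⟨p, hp⟩; rfl)

-- exit values of the simple helpers at fuel f+1 when the scan is past the end
theorem unwind_exit (cs : List Char) (stk : List ScanState) (f : Nat) (pos : Int)
    (hwf : wfStk stk) (hp : (cs.length : Int) ≤ pos) :
    unwind cs (f+1) pos stk = (cs.length : Int) := by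
  induction stk generalizing pos with
  | nil => exact absurd hwf (by simp [wfStk])
  | cons s rest ih =>
    match rest, hwf with
    | [], hwf =>
      have hs : s = ScanState.tmpl := hwf
      subst hs
      simp [unwind, runFrame, templateF_exit cs f pos (by omega)]
    | t :: rest2, hwf =>
      have hrest : wfStk (t :: rest2) := hwf.2
      have step : (runFrame cs s (f+1) pos).1 = pos ∨ (runFrame cs s (f+1) pos).1 = (cs.length : Int) := by
        cases s with
        | tmpl => right; simp [runFrame, templateF_exit cs f pos (by omega)]
        | braces d => left; simp [runFrame, bracesF_exit cs f d pos (by omega)]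
        | str q => right; simp [runFrame, stringF, show ¬ pos < (cs.length : Int) by omega]
        | line => left; simp [runFrame, lineF, show ¬ pos < (cs.length : Int) by omega]
        | block => right; simp [runFrame, blockF, show ¬ pos < (cs.length : Int) - 1 by omega]
      have fuel : (runFrame cs s (f+1) pos).2 = f+1 := by
        cases s with
        | tmpl => simp [runFrame, templateF_exit cs f pos (by omega)]
        | braces d => simp [runFrame, bracesF_exit cs f d pos (by omega)]
        | str q => simp [runFrame, stringF, show ¬ pos < (cs.length : Int) by omega]
        | line => simp [runFrame, lineF, show ¬ pos < (cs.length : Int) by omega]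
        | block => simp [runFrame, blockF, show ¬ pos < (cs.length : Int) - 1 by omega]
      show unwind cs (runFrame cs s (f+1) pos).2 (runFrame cs s (f+1) pos).1 (t :: rest2) = _
      rw [fuel]
      rcases step with h | h <;> rw [h] <;> exact ih _ hrest (by omega)

-- well-formed-stack bookkeeping
theorem wf_braces_head (d : Int) (rest : List ScanState)
    (h : wfStk (ScanState.braces d :: rest)) : 1 ≤ d := by
  match rest with
  | [] => simp [wfStk] at h
  | t :: r2 => cases t <;> first | exact h.1 | exact absurd h.1 (by simp)

theorem wf_braces_tail (d : Int) (rest : List ScanState)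
    (h : wfStk (ScanState.braces d :: rest)) : wfStk rest := by
  match rest with
  | [] => simp [wfStk] at h
  | t :: r2 => exact h.2

theorem wf_braces_set (d d' : Int) (rest : List ScanState)
    (h : wfStk (ScanState.braces d :: rest)) (hd : 1 ≤ d') :
    wfStk (ScanState.braces d' :: rest) := by
  match rest with
  | [] => simp [wfStk] at h
  | t :: r2 => cases t <;> first | exact ⟨hd, h.2⟩ | exact absurd h.1 (by simp)

theorem wf_tmpl_tail (rest : List ScanState)
    (h : wfStk (ScanState.tmpl :: rest)) (hne : rest ≠ []) : wfStk rest := by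
  match rest with
  | [] => exact absurd rfl hne
  | t :: r2 => exact h.2

theorem wf_str_shape (q : Char) (rest : List ScanState)
    (h : wfStk (ScanState.str q :: rest)) : ∃ d r2, rest = ScanState.braces d :: r2 := by
  match rest with
  | [] => simp [wfStk] at h
  | t :: r2 => cases t <;> first | exact ⟨_, r2, rfl⟩ | exact absurd h.1 (by simp)

theorem wf_line_shape (rest : List ScanState)
    (h : wfStk (ScanState.line :: rest)) : ∃ d r2, rest = ScanState.braces d :: r2 := by
  match rest with
  | [] => simp [wfStk] at h
  | t :: r2 => cases t <;> first | exact ⟨_, r2, rfl⟩ | exact absurd h.1 (by simp)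

theorem wf_block_shape (rest : List ScanState)
    (h : wfStk (ScanState.block :: rest)) : ∃ d r2, rest = ScanState.braces d :: r2 := by
  match rest with
  | [] => simp [wfStk] at h
  | t :: r2 => cases t <;> first | exact ⟨_, r2, rfl⟩ | exact absurd h.1 (by simp)

theorem wf_tail (s : ScanState) (t : ScanState) (r2 : List ScanState)
    (h : wfStk (s :: t :: r2)) : wfStk (t :: r2) := h.2

theorem bracesF_zero_depth (cs : List Char) (f : Nat) (pos : Int) :
    (bracesF cs f 0 pos).val = (pos, f) := by
  cases f with
  | zero => rw [bracesF]
  | succ f => exact bracesF_exit cs f 0 pos (by omega)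

theorem main_sim (cs : List Char) (f : Nat) (pos : Int) (stk : List ScanState) :
    wfStk stk → bloop cs f pos stk = unwind cs f pos stk := by
  induction f, pos, stk using bloop.induct cs
  all_goals intro hwf
  case case1 pos stk => simp [bloop, unwind_zero]
  case case2 pos f hlt => simp [wfStk] at hwf
  case case3 pos f hlt rest hc ih =>
    rw [show bloop cs (f+1) pos (.tmpl :: rest) = bloop cs f (pos+2) (.tmpl :: rest) by
          simp [bloop, hlt, hc], ih hwf]
    simp [unwind, runFrame, templateF_backslash cs f pos hlt hc]
  case case4 pos f hlt rest h1 hc hemp =>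
    have hr : rest = [] := by simpa using hemp
    subst hr
    rw [show bloop cs (f+1) pos [.tmpl] = pos + 1 by simp [bloop, hlt, h1, hc]]
    simp [unwind, runFrame, templateF_tick cs f pos hlt h1 hc]
  case case5 pos f hlt rest h1 hc hemp ih =>
    have hne : rest ≠ [] := by simpa using hemp
    rw [show bloop cs (f+1) pos (.tmpl :: rest) = bloop cs (f+1) (pos+1) rest by
          simp [bloop, hlt, h1, hc, hemp], ih (wf_tmpl_tail rest hwf hne)]
    simp [unwind, runFrame, templateF_tick cs f pos hlt h1 hc]
  case case6 pos f hlt rest h1 h2 hc ih =>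
    have hwf2 : wfStk (ScanState.braces 1 :: ScanState.tmpl :: rest) := ⟨by norm_num, hwf⟩
    rw [show bloop cs (f+1) pos (.tmpl :: rest)
          = bloop cs f (pos+2) (.braces 1 :: .tmpl :: rest) by
          simp [bloop, hlt, h1, h2, hc], ih hwf2]
    simp [unwind, runFrame, templateF_dollar cs f pos hlt h1 h2 hc]
  case case7 pos f hlt rest h1 h2 h3 ih =>
    rw [show bloop cs (f+1) pos (.tmpl :: rest) = bloop cs f (pos+1) (.tmpl :: rest) by
          simp [bloop, hlt, h1, h2, h3], ih hwf]
    simp [unwind, runFrame, templateF_other cs f pos hlt h1 h2 h3]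
  case case8 pos f hlt d rest hc ih =>
    have hd := wf_braces_head d rest hwf
    rw [show bloop cs (f+1) pos (.braces d :: rest)
          = bloop cs f (pos+2) (.line :: .braces d :: rest) by
          simp [bloop, hlt, hc], ih ⟨trivial, hwf⟩]
    simp [unwind, runFrame, bracesF_line cs f d pos ⟨hlt, by omega⟩ hc]
  case case9 pos f hlt d rest h1 hc ih =>
    have hd := wf_braces_head d rest hwf
    rw [show bloop cs (f+1) pos (.braces d :: rest)
          = bloop cs f (pos+2) (.block :: .braces d :: rest) by
          simp [bloop, hlt, h1, hc], ih ⟨trivial, hwf⟩]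
    simp [unwind, runFrame, bracesF_block cs f d pos ⟨hlt, by omega⟩ h1 hc]
  case case10 pos f hlt d rest h1 h2 hc ih =>
    have hd := wf_braces_head d rest hwf
    rw [show bloop cs (f+1) pos (.braces d :: rest)
          = bloop cs f (pos+1) (.str (pvChar cs pos) :: .braces d :: rest) by
          simp [bloop, hlt, h1, h2, hc], ih ⟨trivial, hwf⟩]
    simp [unwind, runFrame, bracesF_str cs f d pos ⟨hlt, by omega⟩ h1 h2 hc]
  case case11 pos f hlt d rest h1 h2 h3 hc ih =>
    have hd := wf_braces_head d rest hwf
    rw [show bloop cs (f+1) pos (.braces d :: rest)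
          = bloop cs f (pos+1) (.tmpl :: .braces d :: rest) by
          simp [bloop, hlt, h1, h2, h3, hc], ih ⟨trivial, hwf⟩]
    simp [unwind, runFrame, bracesF_tick cs f d pos ⟨hlt, by omega⟩ h1 h2 h3 hc]
  case case12 pos f hlt d rest h1 h2 h3 h4 hc ih =>
    have hd := wf_braces_head d rest hwf
    rw [show bloop cs (f+1) pos (.braces d :: rest)
          = bloop cs f (pos+1) (.braces (d+1) :: rest) by
          simp [bloop, hlt, h1, h2, h3, h4, hc],
        ih (wf_braces_set d (d+1) rest hwf (by omega))]
    simp [unwind, runFrame, bracesF_open cs f d pos ⟨hlt, by omega⟩ h1 h2 h3 h4 hc]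
  case case13 pos f hlt rest h1 h2 h3 h4 h5 hc ih =>
    rw [show bloop cs (f+1) pos (.braces 1 :: rest) = bloop cs f (pos+1) rest by
          simp [bloop, hlt, h1, h2, h3, h4, h5, hc], ih (wf_braces_tail 1 rest hwf)]
    simp [unwind, runFrame, bracesF_close cs f 1 pos ⟨hlt, by omega⟩ h1 h2 h3 h4 h5 hc,
          bracesF_zero_depth]
  case case14 pos f hlt d rest h1 h2 h3 h4 h5 hc hd1 ih =>
    have hd := wf_braces_head d rest hwf
    rw [show bloop cs (f+1) pos (.braces d :: rest)
          = bloop cs f (pos+1) (.braces (d-1) :: rest) by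
          simp [bloop, hlt, h1, h2, h3, h4, h5, hc, hd1],
        ih (wf_braces_set d (d-1) rest hwf (by omega))]
    simp [unwind, runFrame, bracesF_close cs f d pos ⟨hlt, by omega⟩ h1 h2 h3 h4 h5 hc]
  case case15 pos f hlt d rest h1 h2 h3 h4 h5 h6 ih =>
    have hd := wf_braces_head d rest hwf
    rw [show bloop cs (f+1) pos (.braces d :: rest)
          = bloop cs f (pos+1) (.braces d :: rest) by
          simp [bloop, hlt, h1, h2, h3, h4, h5, h6], ih hwf]
    simp [unwind, runFrame, bracesF_other cs f d pos ⟨hlt, by omega⟩ h1 h2 h3 h4 h5 h6]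
  case case16 pos f hlt q rest hc ih =>
    rw [show bloop cs (f+1) pos (.str q :: rest) = bloop cs f (pos+2) (.str q :: rest) by
          simp [bloop, hlt, hc], ih hwf]
    simp [unwind, runFrame, stringF, hlt, hc]
  case case17 pos f hlt rest h1 ih =>
    obtain ⟨d, r2, hr⟩ := wf_str_shape (pvChar cs pos) rest hwf
    rw [show bloop cs (f+1) pos (.str (pvChar cs pos) :: rest)
          = bloop cs (f+1) (pos+1) rest by simp [bloop, hlt, h1],
        ih (wf_tail _ _ _ (hr ▸ hwf) |> fun h => hr ▸ h)]
    simp [unwind, runFrame, stringF, hlt, h1]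
  case case18 pos f hlt q rest h1 hq ih =>
    rw [show bloop cs (f+1) pos (.str q :: rest) = bloop cs f (pos+1) (.str q :: rest) by
          simp [bloop, hlt, h1, hq], ih hwf]
    simp [unwind, runFrame, stringF, hlt, h1, hq]
  case case19 pos f hlt rest hc ih =>
    obtain ⟨d, r2, hr⟩ := wf_line_shape rest hwf
    subst hr
    have hd := wf_braces_head d r2 hwf.2
    rw [show bloop cs (f+1) pos (.line :: .braces d :: r2)
          = bloop cs f (pos+1) (.braces d :: r2) by simp [bloop, hlt, hc], ih hwf.2]
    have c1 : ¬ pvChar cs pos = '/' := by rw [hc]; decide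
    have c3 : ¬ (pvChar cs pos = '"' ∨ pvChar cs pos = '\'') := by rw [hc]; decide
    have c4 : ¬ pvChar cs pos = '`' := by rw [hc]; decide
    have c5 : ¬ pvChar cs pos = '{' := by rw [hc]; decide
    have c6 : ¬ pvChar cs pos = '}' := by rw [hc]; decide
    have e1 : unwind cs (f+1) pos (ScanState.line :: ScanState.braces d :: r2)
        = unwind cs (f+1) pos (ScanState.braces d :: r2) := by
      show unwind cs (runFrame cs ScanState.line (f+1) pos).2
            (runFrame cs ScanState.line (f+1) pos).1 (ScanState.braces d :: r2) = _
      rw [show runFrame cs ScanState.line (f+1) pos = (pos, f+1) from by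
            simp [runFrame, lineF, hc]]
    have e2 : unwind cs (f+1) pos (ScanState.braces d :: r2)
        = unwind cs f (pos+1) (ScanState.braces d :: r2) := by
      show unwind cs (runFrame cs (ScanState.braces d) (f+1) pos).2
            (runFrame cs (ScanState.braces d) (f+1) pos).1 r2
          = unwind cs (runFrame cs (ScanState.braces d) f (pos+1)).2
            (runFrame cs (ScanState.braces d) f (pos+1)).1 r2
      rw [show runFrame cs (ScanState.braces d) (f+1) pos
            = runFrame cs (ScanState.braces d) f (pos+1) from by
            simp [runFrame,
              bracesF_other cs f d pos ⟨hlt, by omega⟩ (by simp [c1]) (by simp [c1]) c3 c4 c5 c6]]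
    rw [e1, e2]
  case case20 pos f hlt rest hc ih =>
    rw [show bloop cs (f+1) pos (.line :: rest) = bloop cs f (pos+1) (.line :: rest) by
          simp [bloop, hlt, hc], ih hwf]
    simp [unwind, runFrame, lineF, hlt, hc]
  case case21 f rest hlt =>
    obtain ⟨d, r2, hr⟩ := wf_block_shape rest hwf
    rw [show bloop cs (f+1) ((cs.length : Int) - 1) (.block :: rest) = (cs.length : Int) by
          simp [bloop, hlt]]
    have hb : blockF cs (f+1) ((cs.length : Int) - 1) = ((cs.length : Int), f+1) := by
      simp [blockF]
    rw [show unwind cs (f+1) ((cs.length : Int) - 1) (.block :: rest)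
          = unwind cs (f+1) (cs.length : Int) rest by simp [unwind, runFrame, hb]]
    exact unwind_exit cs rest f (cs.length : Int) (hr ▸ wf_tail _ _ _ (hr ▸ hwf)) (le_refl _) |>.symm
  case case22 pos f hlt rest hne hc ih =>
    obtain ⟨d, r2, hr⟩ := wf_block_shape rest hwf
    have hb : blockF cs (f+1) pos = (pos + 2, f+1) := by
      simp [blockF, show pos < (cs.length : Int) - 1 by omega, hc.1, hc.2]
    rw [show bloop cs (f+1) pos (.block :: rest) = bloop cs (f+1) (pos+2) rest by
          simp [bloop, hlt, hne, hc.1, hc.2],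
        ih (hr ▸ wf_tail _ _ _ (hr ▸ hwf))]
    simp [unwind, runFrame, hb]
  case case23 pos f hlt rest hne hc ih =>
    have hb : blockF cs (f+1) pos = blockF cs f (pos + 1) := by
      rw [blockF.eq_def]
      simp [show pos < (cs.length : Int) - 1 by omega]
      intro h1 h2
      exact absurd ⟨h1, h2⟩ hc
    rw [show bloop cs (f+1) pos (.block :: rest) = bloop cs f (pos+1) (.block :: rest) by
          simp [bloop, hlt, hne, hc], ih hwf]
    simp [unwind, runFrame, hb]
  case case24 pos f stk hge =>
    rw [show bloop cs (f+1) pos stk = (cs.length : Int) by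
          rw [bloop.eq_def]; simp [hge]]
    exact (unwind_exit cs stk f pos hwf (by omega)).symm


-- ===== VERDICT (by name: the statement is the Claim_ definition above) =====
theorem skip_template_literal_spec : Claim_equal_skip_template_literal := by
  intro src pos _ _
  unfold Spec_skip_template_literal skip_template_literal skip_template_literal_alt
  rw [main_sim _ _ _ _ (by simp [wfStk])]
  simp [unwind, runFrame]
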